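-- pv_equiv track=rewrite | github.com/akohen/AdventOfCode | aoc_2025/day6.py | part2
-- ===== SOURCE A (Python) =====
-- from math import prod
--
-- def part1(data):
--     total = 0
--     for row in data:
--         if row[-1] == '+':
--             total += sum(row[:-1])
--         else:
--             total += prod(row[:-1])
--     return total
--
-- def part2(file):
--     lines = file.splitlines()
--     rows, current_row, current_op = [], [], ''
--
--     for i in range(len(lines[0])):
--         current_number = [lines[j][i] for j in range(len(lines)-1) if lines[j][i] != ' ']
--         if lines[-1][i] != ' ':
--             current_op = lines[-1][i]
--         if len(current_number) == 0:
--             current_row.append(current_op)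
--             rows.append(current_row)
--             current_row = []
--         else:
--             current_row.append(int(''.join(current_number)))
--     current_row.append(current_op)
--     rows.append(current_row)
--
--     return part1(rows)
-- ===== SOURCE B (Python) =====
-- from math import prod
--
-- def part2(file):
--     lines = file.splitlines()
--     total, group, op = 0, [], ''
--     for col in zip(*lines):
--         if col[-1] != ' ':
--             op = col[-1]
--         digits = ''.join(col[:-1]).replace(' ', '')
--         if digits:
--             group.append(int(digits))
--         else:
--             total += sum(group) if op == '+' else prod(group)
--             group = []
--     total += sum(group) if op == '+' else prod(group)
--     return total
-- ===== Notes on version B (the rewrite author's own statement) =====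
-- stated objective: faster
-- what changed: B transposes the grid once with zip(*lines) and folds the columns in a single pass keeping only a running total, current group and operator, instead of A's per-index loop that rebuilds each column with a Python-level comprehension, materialises a rows list of groups and then re-walks it with part1.
import Mathlib
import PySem

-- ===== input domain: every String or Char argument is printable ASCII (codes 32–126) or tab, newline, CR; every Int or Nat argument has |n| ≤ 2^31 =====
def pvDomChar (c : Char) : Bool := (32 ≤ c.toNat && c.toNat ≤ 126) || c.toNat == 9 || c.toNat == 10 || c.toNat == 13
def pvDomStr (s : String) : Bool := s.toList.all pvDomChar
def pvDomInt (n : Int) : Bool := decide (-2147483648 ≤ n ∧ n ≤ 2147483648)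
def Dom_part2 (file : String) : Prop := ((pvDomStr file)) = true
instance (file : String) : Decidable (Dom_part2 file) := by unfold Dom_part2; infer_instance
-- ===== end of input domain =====

-- B replaces A's index loop + rows list + part1 re-walk by one fold over the zip(*lines) columns
-- keeping a running total (return-value equivalence; neither version mutates its argument).

-- ===== PORT A =====
-- rows in the Python are heterogeneous lists "ints ++ [op-string]"; they are modelled as the
-- pair (ints, op written as List Char), so row[:-1] = .1 and row[-1] = .2 — value-exact.
def part1A (data : List (List Int × List Char)) : Int :=
  data.foldl (fun total row =>
    if row.2 = ['+'] then total + row.1.sum else total + row.1.prod) 0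

def part2 (file : String) : Int :=
  let lines := (PySem.Str.splitlines file).map String.toList
  let st := (PySem.List.pyRange 0 ((PySem.List.pyGetD lines 0 []).length : Int) 1).foldl
    (fun (st : List (List Int × List Char) × List Int × List Char) i =>
      let rows := st.1
      let currentRow := st.2.1
      let currentOp := st.2.2
      let currentNumber :=
        ((PySem.List.pyRange 0 ((lines.length : Int) - 1) 1).map
          (fun j => PySem.List.pyGetD (PySem.List.pyGetD lines j []) i ' ')).filter (· ≠ ' ')
      let currentOp :=
        if PySem.List.pyGetD (PySem.List.pyGetD lines (-1) []) i ' ' ≠ ' '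
        then [PySem.List.pyGetD (PySem.List.pyGetD lines (-1) []) i ' ']
        else currentOp
      if currentNumber.length = 0 then
        (rows ++ [(currentRow, currentOp)], [], currentOp)
      else
        (rows, currentRow ++ [(PySem.Int.ofChars? currentNumber).getD 0], currentOp))
    ([], [], [])
  part1A (st.1 ++ [(st.2.1, st.2.2)])

-- ===== PORT B =====
-- zip(*lines): truncates at the shortest line, exactly Python's zip.
def pyZipGo : List Char → List (List Char) → List (List Char)
  | [], _ => []
  | c :: cs, rest =>
    if rest.any (fun l => l.isEmpty) then []
    else (c :: rest.map (fun l => l.headD ' ')) :: pyZipGo cs (rest.map (fun l => l.tail))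

def pyZipCols : List (List Char) → List (List Char)
  | [] => []
  | l0 :: rest => pyZipGo l0 rest

-- "sum(group) if op == '+' else prod(group)"
def evalGroup (group : List Int) (op : List Char) : Int :=
  if op = ['+'] then group.sum else group.prod

def part2_alt (file : String) : Int :=
  let lines := (PySem.Str.splitlines file).map String.toList
  let st := (pyZipCols lines).foldl
    (fun (st : Int × List Int × List Char) col =>
      let total := st.1
      let group := st.2.1
      let op := st.2.2
      let op := if col.getLastD ' ' ≠ ' ' then [col.getLastD ' '] else op
      let digits := col.dropLast.filter (· ≠ ' ')
      if digits ≠ [] then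
        (total, group ++ [(PySem.Int.ofChars? digits).getD 0], op)
      else
        (total + evalGroup group op, [], op))
    (0, [], [])
  st.1 + evalGroup st.2.1 st.2.2

-- ===== PRECONDITION & SPEC =====
-- Pre_ admits exactly the inputs the Python A returns on: at least one line, every line at
-- least as long as the first (else IndexError), and every nonempty vertical digit-column of
-- the non-operator rows parses as a Python int (else ValueError).
def Pre_part2 (file : String) : Prop :=
  let lines := (PySem.Str.splitlines file).map String.toList
  lines ≠ [] ∧
  (∀ l ∈ lines, (lines.headD []).length ≤ l.length) ∧
  (∀ i ∈ List.range (lines.headD []).length,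
    ((lines.dropLast.map (fun l => l.getD i ' ')).filter (· ≠ ' ')) ≠ [] →
    (PySem.Int.ofChars? ((lines.dropLast.map (fun l => l.getD i ' ')).filter (· ≠ ' '))).isSome)
instance (file : String) : Decidable (Pre_part2 file) := by unfold Pre_part2; infer_instance

def pvWitness_part2 : String := "12\n34\n+ "

def Spec_part2 (file : String) (out : Int) : Prop := out = part2_alt file
instance (file : String) (out : Int) : Decidable (Spec_part2 file out) := by unfold Spec_part2; infer_instance

-- ===== CLAIM (what is proved, stated in full; the proofs are below) =====
def Claim_equal_part2 : Prop := ∀ (file : String), Dom_part2 file → Pre_part2 file → Spec_part2 file (part2 file)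

-- ===== LEMMAS AND PROOFS =====

theorem part2_witness_ok : Dom_part2 pvWitness_part2 ∧ Pre_part2 pvWitness_part2 := by decide


-- proof-only helpers: the per-column data and the two loop bodies on that data
def colFn (L : List (List Char)) (i : Nat) : List Char := L.map (fun l => l.getD i ' ')

def stepA (st : List (List Int × List Char) × List Int × List Char) (col : List Char) :
    List (List Int × List Char) × List Int × List Char :=
  let op := if col.getLastD ' ' ≠ ' ' then [col.getLastD ' '] else st.2.2
  let num := col.dropLast.filter (· ≠ ' ')
  if num.length = 0 then (st.1 ++ [(st.2.1, op)], [], op)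
  else (st.1, st.2.1 ++ [(PySem.Int.ofChars? num).getD 0], op)

def stepB (st : Int × List Int × List Char) (col : List Char) : Int × List Int × List Char :=
  let op := if col.getLastD ' ' ≠ ' ' then [col.getLastD ' '] else st.2.2
  let digits := col.dropLast.filter (· ≠ ' ')
  if digits ≠ [] then (st.1, st.2.1 ++ [(PySem.Int.ofChars? digits).getD 0], op)
  else (st.1 + evalGroup st.2.1 op, [], op)

lemma getD_zero_headD (l : List Char) : l.getD 0 ' ' = l.headD ' ' := by
  cases l <;> simp

lemma getD_succ_tail (l : List Char) (i : Nat) : l.getD (i + 1) ' ' = l.tail.getD i ' ' := by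
  cases l <;> simp

lemma pyZipGo_eq (l0 : List Char) : ∀ (rest : List (List Char)),
    (∀ l ∈ rest, l0.length ≤ l.length) →
    pyZipGo l0 rest =
      (List.range l0.length).map (fun i => (l0 :: rest).map (fun l => l.getD i ' ')) := by
  induction l0 with
  | nil => intro rest _; simp [pyZipGo]
  | cons c cs ih =>
    intro rest h
    have hany : rest.any (fun l => l.isEmpty) = false := by
      simp only [List.any_eq_false]
      intro l hl
      have := h l hl
      simp only [List.length_cons] at this
      simp only [List.isEmpty_iff]
      intro hnil; subst hnil; simp at this
    have hrest : ∀ l ∈ rest.map (fun l => l.tail), cs.length ≤ l.length := by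
      intro l hl
      obtain ⟨l', hl', rfl⟩ := List.mem_map.mp hl
      have := h l' hl'
      simp only [List.length_cons] at this
      simp [List.length_tail]; omega
    simp only [pyZipGo, hany, Bool.false_eq_true, if_false, ih _ hrest]
    simp only [List.length_cons]
    rw [List.range_succ_eq_map]
    simp only [List.map_cons, List.map_map]
    congr 1
    · simp only [List.getD_cons_zero]
      congr 1
      exact List.map_congr_left (fun l _ => (getD_zero_headD l).symm)
    · apply List.map_congr_left
      intro i _
      simp only [Function.comp, List.getD_cons_succ]
      congr 1
      exact List.map_congr_left (fun l _ => (getD_succ_tail l i).symm)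

lemma map_range_getD {α β : Type} (L : List α) (d : α) (f : α → β) :
    (List.range (L.length - 1)).map (fun j => f (L.getD j d)) = L.dropLast.map f := by
  apply List.ext_getElem
  · simp
  · intro i h1 h2
    simp only [List.length_map, List.length_range] at h1
    simp only [List.getElem_map, List.getElem_range, List.getElem_dropLast,
      List.getD_eq_getElem?_getD]
    rw [List.getElem?_eq_getElem (by omega)]
    rfl

lemma getLastD_map_getD (L : List (List Char)) (h : L ≠ []) (i : Nat) :
    (colFn L i).getLastD ' ' = (L.getLast h).getD i ' ' := by
  unfold colFn
  rw [List.getLastD_eq_getLast?, List.getLast?_map, List.getLast?_eq_some_getLast h]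
  rfl

lemma part1A_append (rows : List (List Int × List Char)) (cur : List Int) (op : List Char) :
    part1A (rows ++ [(cur, op)]) = part1A rows + evalGroup cur op := by
  unfold part1A evalGroup
  rw [List.foldl_append]
  simp only [List.foldl_cons, List.foldl_nil]
  split_ifs <;> rfl

lemma fold_inv (cols : List (List Char)) :
    ∀ (rows : List (List Int × List Char)) (cur : List Int) (op : List Char),
      cols.foldl stepB (part1A rows, cur, op) =
        ((fun st => (part1A st.1, st.2.1, st.2.2)) (cols.foldl stepA (rows, cur, op)) :
          Int × List Int × List Char) := by
  induction cols with
  | nil => intro rows cur op; rfl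
  | cons col cols ih =>
    intro rows cur op
    simp only [List.foldl_cons]
    by_cases hnil : col.dropLast.filter (· ≠ ' ') = []
    · have hall : ∀ a ∈ col.dropLast, a = ' ' := by
        intro a ha
        simpa using List.filter_eq_nil_iff.mp hnil a ha
      have hA : stepA (rows, cur, op) col =
          (rows ++ [(cur, if col.getLastD ' ' ≠ ' ' then [col.getLastD ' '] else op)], [],
            if col.getLastD ' ' ≠ ' ' then [col.getLastD ' '] else op) := by
        simp [stepA]
        exact hall
      have hB : stepB (part1A rows, cur, op) col =
          (part1A rows + evalGroup cur (if col.getLastD ' ' ≠ ' ' then [col.getLastD ' '] else op),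
            [], if col.getLastD ' ' ≠ ' ' then [col.getLastD ' '] else op) := by
        simp [stepB]
        exact hall
      rw [hA, hB, ← part1A_append, ih]
    · have hex : ∃ x ∈ col.dropLast, ¬x = ' ' := by
        by_contra hc
        push Not at hc
        exact hnil (List.filter_eq_nil_iff.mpr (by simpa using hc))
      have hA : stepA (rows, cur, op) col =
          (rows, cur ++ [(PySem.Int.ofChars? (col.dropLast.filter (· ≠ ' '))).getD 0],
            if col.getLastD ' ' ≠ ' ' then [col.getLastD ' '] else op) := by
        simp [stepA]
        exact hex
      have hB : stepB (part1A rows, cur, op) col =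
          (part1A rows, cur ++ [(PySem.Int.ofChars? (col.dropLast.filter (· ≠ ' '))).getD 0],
            if col.getLastD ' ' ≠ ' ' then [col.getLastD ' '] else op) := by
        simp [stepB]
        exact hex
      rw [hA, hB]
      exact ih _ _ _

-- A's loop body and loop result, named for the proof (definitionally equal to part2's code)
def bodyA (lines : List (List Char))
    (st : List (List Int × List Char) × List Int × List Char) (i : Int) :
    List (List Int × List Char) × List Int × List Char :=
  let rows := st.1
  let currentRow := st.2.1
  let currentOp := st.2.2
  let currentNumber :=
    ((PySem.List.pyRange 0 ((lines.length : Int) - 1) 1).map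
      (fun j => PySem.List.pyGetD (PySem.List.pyGetD lines j []) i ' ')).filter (· ≠ ' ')
  let currentOp :=
    if PySem.List.pyGetD (PySem.List.pyGetD lines (-1) []) i ' ' ≠ ' '
    then [PySem.List.pyGetD (PySem.List.pyGetD lines (-1) []) i ' ']
    else currentOp
  if currentNumber.length = 0 then
    (rows ++ [(currentRow, currentOp)], [], currentOp)
  else
    (rows, currentRow ++ [(PySem.Int.ofChars? currentNumber).getD 0], currentOp)

def stA (lines : List (List Char)) : List (List Int × List Char) × List Int × List Char :=
  (PySem.List.pyRange 0 ((PySem.List.pyGetD lines 0 []).length : Int) 1).foldl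
    (bodyA lines) ([], [], [])

def stB (lines : List (List Char)) : Int × List Int × List Char :=
  (pyZipCols lines).foldl stepB (0, [], [])

lemma part2_eq (file : String) :
    part2 file =
      part1A ((stA ((PySem.Str.splitlines file).map String.toList)).1 ++
        [((stA ((PySem.Str.splitlines file).map String.toList)).2.1,
          (stA ((PySem.Str.splitlines file).map String.toList)).2.2)]) := rfl

lemma part2_alt_eq (file : String) :
    part2_alt file =
      (stB ((PySem.Str.splitlines file).map String.toList)).1 +
        evalGroup (stB ((PySem.Str.splitlines file).map String.toList)).2.1
          (stB ((PySem.Str.splitlines file).map String.toList)).2.2 := rfl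

lemma pyZipCols_eq (L : List (List Char)) (hne : L ≠ [])
    (hlen : ∀ l ∈ L, (L.headD []).length ≤ l.length) :
    pyZipCols L = (List.range (L.headD []).length).map (colFn L) := by
  cases L with
  | nil => exact absurd rfl hne
  | cons l0 rest =>
    rw [show pyZipCols (l0 :: rest) = pyZipGo l0 rest from rfl]
    rw [pyZipGo_eq l0 rest (fun l hl => by
      simpa using hlen l (List.mem_cons_of_mem _ hl))]
    rfl

lemma bodyA_eq (L : List (List Char)) (hne : L ≠ [])
    (st : List (List Int × List Char) × List Int × List Char) (k : Nat) :
    bodyA L st (k : Int) = stepA st (colFn L k) := by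
  have hpos : 0 < L.length := List.length_pos_of_ne_nil hne
  have hl1 : ((L.length : Int) - 1) = ((L.length - 1 : Nat) : Int) := by omega
  unfold bodyA stepA
  rw [hl1, PySem.List.pyRange_zero_natCast, List.map_map]
  simp only [Function.comp_def, PySem.List.pyGetD_natCast]
  rw [map_range_getD L [] (fun l => l.getD k ' ')]
  rw [PySem.List.pyGetD_neg_one (d := ([] : List Char)) (h := hne)]
  rw [getLastD_map_getD L hne k]
  unfold colFn
  rw [← List.map_dropLast]

lemma core (L : List (List Char)) (hne : L ≠ [])
    (hlen : ∀ l ∈ L, (L.headD []).length ≤ l.length) :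
    part1A ((stA L).1 ++ [((stA L).2.1, (stA L).2.2)]) =
      (stB L).1 + evalGroup (stB L).2.1 (stB L).2.2 := by
  have hstA : stA L = ((List.range (L.headD []).length).map (colFn L)).foldl stepA ([], [], []) := by
    unfold stA
    rw [show ((PySem.List.pyGetD L 0 []).length : Int) = (((L.headD []).length : Nat) : Int) from by
      rw [PySem.List.pyGetD_zero]; cases L <;> rfl]
    rw [PySem.List.pyRange_zero_natCast, List.foldl_map, List.foldl_map]
    apply PySem.List.foldl_congr_mem
    intro st k _
    exact bodyA_eq L hne st k
  have hstB : stB L = ((List.range (L.headD []).length).map (colFn L)).foldl stepB (0, [], []) := by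
    unfold stB
    rw [pyZipCols_eq L hne hlen]
  rw [hstA, hstB]
  have h := fold_inv ((List.range (L.headD []).length).map (colFn L)) [] [] []
  rw [show part1A [] = 0 from rfl] at h
  rw [h]
  exact part1A_append _ _ _

-- ===== VERDICT (by name: the statement is the Claim_ definition above) =====
theorem part2_spec : Claim_equal_part2 := by
  intro file _ hpre
  unfold Pre_part2 at hpre
  obtain ⟨hne, hlen, -⟩ := hpre
  unfold Spec_part2
  rw [part2_eq, part2_alt_eq]
  exact core ((PySem.Str.splitlines file).map String.toList) hne hlen
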